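-- pv_equiv track=rewrite | github.com/ACFHarbinger/WSmartPlus-Route | logic/src/policies/matheuristics/lin_kernighan_helsgaun_three/objective.py | split_tour_at_dummies
-- ===== SOURCE A (Python) =====
-- from typing import Dict, List, Optional, Tuple
--
-- DEPOT_NODE = 0  # Main depot index (always 0)
--
-- def is_dummy_depot(node: int, n_original: Optional[int] = None) -> bool:
--     """
--     Check if a node represents a secondary vehicle (dummy depot).
--
--     In augmented graph mode (VRPP/CVRP), dummy depots are placed after
--     original nodes. In legacy mode, they are represented by negative indices.
--     """
--     if n_original is not None:
--         return node >= n_original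
--     return node < 0
--
-- def is_any_depot(node: int, n_original: Optional[int] = None) -> bool:
--     """Check if node is either the main depot or an augmented dummy depot."""
--     return node == DEPOT_NODE or is_dummy_depot(node, n_original)
--
-- def split_tour_at_dummies(tour: List[int], n_original: Optional[int] = None) -> List[List[int]]:
--     """
--     Split an augmented Hamiltonian circuit into discrete vehicle routes.
--
--     Segments are delimited by any node identified as a depot or dummy depot.
--     Resulting routes contain only customer node indices.
--     """
--     routes: List[List[int]] = []
--     current: List[int] = []
--
--     for node in tour:
--         if is_any_depot(node, n_original):
--             if current:
--                 routes.append(current)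
--                 current = []
--         else:
--             current.append(node)
--
--     if current:
--         routes.append(current)
--
--     return routes
-- ===== SOURCE B (Python) =====
-- from typing import List, Optional
--
-- DEPOT_NODE = 0  # Main depot index (always 0)
--
--
-- def is_dummy_depot(node: int, n_original: Optional[int] = None) -> bool:
--     if n_original is not None:
--         return node >= n_original
--     return node < 0
--
--
-- def is_any_depot(node: int, n_original: Optional[int] = None) -> bool:
--     return node == DEPOT_NODE or is_dummy_depot(node, n_original)
--
--
-- def split_tour_at_dummies(tour: List[int], n_original: Optional[int] = None) -> List[List[int]]:
--     # Staged: first collect the positions of all depot nodes, then slice the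
--     # tour between consecutive cut positions, keeping only non-empty slices.
--     cuts = [i for i, node in enumerate(tour) if is_any_depot(node, n_original)]
--     starts = [-1] + cuts
--     stops = cuts + [len(tour)]
--     return [tour[i + 1:j] for i, j in zip(starts, stops) if j - i > 1]
-- ===== Notes on version B (the rewrite author's own statement) =====
-- stated objective: alternative
-- what changed: Replaces A's streaming current/flush accumulator with a staged computation: first collect the index positions of all depot nodes, then slice the tour between consecutive cut positions, keeping only non-empty slices.
import Mathlib
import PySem

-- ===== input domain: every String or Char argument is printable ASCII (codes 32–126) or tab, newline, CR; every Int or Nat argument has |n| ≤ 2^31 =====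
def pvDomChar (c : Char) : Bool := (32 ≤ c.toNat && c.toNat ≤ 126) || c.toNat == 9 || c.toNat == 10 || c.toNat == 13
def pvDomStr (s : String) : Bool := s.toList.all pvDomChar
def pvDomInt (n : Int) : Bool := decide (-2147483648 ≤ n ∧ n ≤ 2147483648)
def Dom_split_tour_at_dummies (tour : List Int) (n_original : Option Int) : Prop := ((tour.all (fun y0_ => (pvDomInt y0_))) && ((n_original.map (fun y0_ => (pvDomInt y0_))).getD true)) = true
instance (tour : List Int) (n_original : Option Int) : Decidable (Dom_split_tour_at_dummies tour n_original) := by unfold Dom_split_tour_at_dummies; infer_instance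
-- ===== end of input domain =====

-- B differs from A's streaming accumulator: it first collects the index positions of
-- all depot nodes, then slices the tour between consecutive cut positions, keeping the
-- non-empty slices; objective: alternative decomposition, same asymptotic cost.


-- ===== PORT A =====
-- helper from the module, shared by both Pythons
def is_dummy_depot (node : Int) (n_original : Option Int) : Bool :=
  match n_original with
  | some n => decide (node ≥ n)
  | none   => decide (node < 0)

def is_any_depot (node : Int) (n_original : Option Int) : Bool :=
  node == 0 || is_dummy_depot node n_original

-- A's loop: state (routes, current), flushed on depot nodes and at the end
def splitA_go (n_original : Option Int) : List Int → List (List Int) → List Int → List (List Int)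
  | [], routes, current =>
      if current.isEmpty then routes else routes ++ [current]
  | node :: rest, routes, current =>
      if is_any_depot node n_original then
        if current.isEmpty then splitA_go n_original rest routes []
        else splitA_go n_original rest (routes ++ [current]) []
      else splitA_go n_original rest routes (current ++ [node])

def split_tour_at_dummies (tour : List Int) (n_original : Option Int) : List (List Int) :=
  splitA_go n_original tour [] []

-- ===== PORT B =====
-- cuts = [i for i, node in enumerate(tour) if is_any_depot(node, n_original)]
def pvCuts (n_original : Option Int) (tour : List Int) : List Int :=
  ((PySem.List.enumerate tour).filter (fun pr => is_any_depot pr.2 n_original)).map (fun pr => pr.1)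

def split_tour_at_dummies_alt (tour : List Int) (n_original : Option Int) : List (List Int) :=
  let cuts := pvCuts n_original tour
  let starts := (-1 : Int) :: cuts
  let stops := cuts ++ [(tour.length : Int)]
  ((starts.zip stops).filter (fun pr => pr.2 - pr.1 > 1)).map
    (fun pr => PySem.List.slice tour (some (pr.1 + 1)) (some pr.2))

-- ===== PRECONDITION & SPEC =====
def Spec_split_tour_at_dummies (tour : List Int) (n_original : Option Int) (out : List (List Int)) : Prop := out = split_tour_at_dummies_alt tour n_original
instance (tour : List Int) (n_original : Option Int) (out : List (List Int)) : Decidable (Spec_split_tour_at_dummies tour n_original out) := by unfold Spec_split_tour_at_dummies; infer_instance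

-- ===== CLAIM (what is proved, stated in full; the proofs are below) =====
def Claim_equal_split_tour_at_dummies : Prop := ∀ (tour : List Int) (n_original : Option Int), Dom_split_tour_at_dummies tour n_original → Spec_split_tour_at_dummies tour n_original (split_tour_at_dummies tour n_original)

-- ===== LEMMAS AND PROOFS =====

-- intermediate characterisation: splitting with a pending (non-flushed) current route
def fSpec (n : Option Int) (cur : List Int) : List Int → List (List Int)
  | [] => if cur.isEmpty then [] else [cur]
  | x :: xs =>
      if is_any_depot x n then
        if cur.isEmpty then fSpec n [] xs else cur :: fSpec n [] xs
      else fSpec n (cur ++ [x]) xs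

theorem splitA_go_eq (n : Option Int) :
    ∀ (l : List Int) (routes : List (List Int)) (cur : List Int),
      splitA_go n l routes cur = routes ++ fSpec n cur l := by
  intro l
  induction l with
  | nil => intro routes cur; by_cases h : cur.isEmpty <;> simp [splitA_go, fSpec, h]
  | cons x xs ih =>
      intro routes cur
      by_cases hd : is_any_depot x n
      · by_cases h : cur.isEmpty <;> simp [splitA_go, fSpec, hd, h, ih]
      · simp [splitA_go, fSpec, hd, ih]

theorem fSpec_ext (n : Option Int) :
    ∀ (t : List Int) (cur r : List Int), (∀ y ∈ t, is_any_depot y n = false) →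
      fSpec n cur (t ++ r) = fSpec n (cur ++ t) r := by
  intro t
  induction t with
  | nil => intro cur r _; simp
  | cons y ys ih =>
      intro cur r h
      have hy : is_any_depot y n = false := h y (by simp)
      simp only [List.cons_append, fSpec, hy, Bool.false_eq_true, if_false]
      rw [ih (cur ++ [y]) r (fun z hz => h z (by simp [hz]))]
      simp

theorem enumerate_shift {α : Type} (xs : List α) :
    ∀ (s : Int), PySem.List.enumerate xs s =
      (PySem.List.enumerate xs 0).map (fun p => (p.1 + s, p.2)) := by
  induction xs with
  | nil => intro s; simp [PySem.List.enumerate_nil]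
  | cons x xs ih =>
      intro s
      rw [PySem.List.enumerate_cons, PySem.List.enumerate_cons, ih (s + 1), ih (0 + 1),
        List.map_cons, List.map_map]
      refine List.cons_eq_cons.mpr ⟨by norm_num, ?_⟩
      apply List.map_congr_left
      intro p _
      simp only [Function.comp, Prod.mk.injEq]
      exact ⟨by omega, by trivial⟩

theorem cuts_cons (n : Option Int) (x : Int) (xs : List Int) :
    pvCuts n (x :: xs) =
      (if is_any_depot x n then [(0 : Int)] else []) ++ (pvCuts n xs).map (· + 1) := by
  unfold pvCuts
  rw [PySem.List.enumerate_cons, enumerate_shift xs (0 + 1)]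
  rw [List.filter_cons]
  by_cases hx : is_any_depot x n <;>
    simp only [hx, if_pos, if_neg, decide_true, decide_false, Bool.false_eq_true,
      List.map_cons, List.singleton_append, List.nil_append, List.filter_map,
      List.map_map, ite_true, ite_false, not_false_iff] <;>
    rfl

theorem cuts_append_nodep (n : Option Int) :
    ∀ (t r : List Int), (∀ y ∈ t, is_any_depot y n = false) →
      pvCuts n (t ++ r) = (pvCuts n r).map (· + (t.length : Int)) := by
  intro t
  induction t with
  | nil => intro r _; simp
  | cons y ys ih =>
      intro r h
      have hy : is_any_depot y n = false := h y (by simp)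
      rw [List.cons_append, cuts_cons, ih r (fun z hz => h z (by simp [hz]))]
      simp only [hy, Bool.false_eq_true, if_false, List.nil_append, List.map_map,
        List.length_cons]
      apply List.map_congr_left
      intro c _
      simp only [Function.comp]
      push_cast
      omega

theorem cuts_mem_bounds (n : Option Int) (l : List Int) :
    ∀ c ∈ pvCuts n l, 0 ≤ c ∧ c < (l.length : Int) := by
  intro c hc
  unfold pvCuts at hc
  simp only [List.mem_map, List.mem_filter] at hc
  obtain ⟨pr, ⟨hmem, _⟩, hfst⟩ := hc
  rw [PySem.List.mem_enumerate_iff] at hmem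
  obtain ⟨k, hk, rfl⟩ := hmem
  simp at hfst
  omega

theorem slice_shift (pre t2 : List Int) (a b : Int) (ha : 0 ≤ a) (hb : 0 ≤ b) :
    PySem.List.slice (pre ++ t2) (some (a + (pre.length : Int))) (some (b + (pre.length : Int)))
      = PySem.List.slice t2 (some a) (some b) := by
  rw [PySem.List.slice_toNat _ (by omega) (by omega), PySem.List.slice_toNat _ ha hb]
  have h1 : (a + (pre.length : Int)).toNat = a.toNat + pre.length := by omega
  have h2 : (b + (pre.length : Int)).toNat = b.toNat + pre.length := by omega
  rw [h1, h2, List.drop_append]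
  rw [List.drop_eq_nil_of_le (by omega)]
  simp only [List.nil_append, Nat.add_sub_cancel]
  congr 1
  omega

-- no-depot prefix: fSpec flushes it at the first depot / end
theorem fSpec_nodep (n : Option Int) (l : List Int)
    (h : ∀ y ∈ l, is_any_depot y n = false) :
    fSpec n [] l = if l.isEmpty then [] else [l] := by
  have := fSpec_ext n l [] [] h
  simpa [fSpec] using this

theorem alt_eq_fSpec (n : Option Int) :
    ∀ (N : ℕ) (l : List Int), l.length ≤ N →
      split_tour_at_dummies_alt l n = fSpec n [] l := by
  intro N
  induction N with
  | zero =>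
      intro l hl
      have hnil : l = [] := List.length_eq_zero_iff.mp (Nat.le_zero.mp hl)
      subst hnil
      simp [split_tour_at_dummies_alt, pvCuts, PySem.List.enumerate_nil, fSpec]
  | succ N ih =>
      intro l hl
      set p : Int → Bool := fun y => is_any_depot y n with hp
      have hsplit : l = l.takeWhile (fun y => !p y) ++ l.dropWhile (fun y => !p y) :=
        (List.takeWhile_append_dropWhile).symm
      set t1 := l.takeWhile (fun y => !p y) with ht1
      have ht1no : ∀ y ∈ t1, is_any_depot y n = false := by
        intro y hy
        have := List.mem_takeWhile_imp hy
        simpa [hp] using this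
      cases hrest : l.dropWhile (fun y => !p y) with
      | nil =>
          -- no depot in l
          have hlno : ∀ y ∈ l, is_any_depot y n = false := by
            intro y hy
            apply ht1no
            rw [ht1]
            conv at hy => rw [hsplit]
            rw [hrest] at hy
            simpa using hy
          have hcuts : pvCuts n l = [] := by
            have := cuts_append_nodep n l [] hlno
            simpa [pvCuts, PySem.List.enumerate_nil] using this
          rw [fSpec_nodep n l hlno]
          simp only [split_tour_at_dummies_alt, hcuts]
          cases l with
          | nil => simp
          | cons x xs =>
              have hc : ((xs.length + 1 : ℕ) : Int) - (-1) > 1 := by push_cast; omega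
              have hsl : PySem.List.slice (x :: xs) (some ((-1 : Int) + 1))
                  (some ((xs.length + 1 : ℕ) : Int)) = x :: xs := by
                have h0 : ((-1 : Int) + 1) = ((0 : ℕ) : Int) := by norm_num
                rw [h0, PySem.List.slice_natCast]
                simp
              simp [List.zip, List.zipWith, List.filter]
              rw [PySem.List.slice_to _ (by positivity)]
              have hT : (((xs.length : Int)) + 1).toNat = xs.length + 1 := by omega
              rw [hT]
              simp
      | cons x t2 =>
          have hx : is_any_depot x n = true := by
            have := List.head?_dropWhile_not (fun y => !p y) l
            rw [hrest] at this
            simp [hp] at this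
            exact this
          have hl2 : l = t1 ++ x :: t2 := by rw [ht1, ← hrest]; exact hsplit
          have hlen2 : t2.length ≤ N := by
            have : l.length = t1.length + (t2.length + 1) := by rw [hl2]; simp
            omega
          -- cuts of l
          have hcuts : pvCuts n (t1 ++ x :: t2) =
              (t1.length : Int) :: (pvCuts n t2).map (· + ((t1.length : Int) + 1)) := by
            rw [cuts_append_nodep n t1 (x :: t2) ht1no, cuts_cons]
            simp only [hx, if_pos, List.singleton_append, List.map_cons, List.map_map,
              Int.zero_add, List.cons.injEq]
            refine ⟨by trivial, ?_⟩
            apply List.map_congr_left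
            intro c _
            simp only [Function.comp]
            omega
          set k : Int := (t1.length : Int) + 1 with hk
          have hLl : (((t1 ++ x :: t2).length : ℕ) : Int) = (t2.length : Int) + k := by
            simp only [List.length_append, List.length_cons]
            push_cast
            omega
          -- RHS
          rw [hl2, fSpec_ext n t1 [] (x :: t2) ht1no]
          simp only [List.nil_append, fSpec, hx, if_pos]
          rw [← ih t2 hlen2]
          -- LHS: unfold B on l and on t2
          simp only [split_tour_at_dummies_alt, hcuts, hLl]
          -- zip decomposition
          have hzipshift :
              ((((t1.length : Int) :: (pvCuts n t2).map (· + k)).zip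
                  (((pvCuts n t2).map (· + k)) ++ [(t2.length : Int) + k])))
                = ((((-1) :: pvCuts n t2).zip (pvCuts n t2 ++ [(t2.length : Int)])).map
                    (Prod.map (· + k) (· + k))) := by
            have h1 : ((t1.length : Int) :: (pvCuts n t2).map (· + k))
                = (((-1) :: pvCuts n t2).map (· + k)) := by
              simp [hk]
            have h2 : (((pvCuts n t2).map (· + k)) ++ [(t2.length : Int) + k])
                = ((pvCuts n t2 ++ [(t2.length : Int)]).map (· + k)) := by
              simp
            rw [h1, h2, List.zip_map]
          simp only [List.cons_append, List.zip_cons_cons]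
          rw [hzipshift, List.filter_cons]
          -- shifted filter+map equals unshifted
          have hmain :
              (((((-1) :: pvCuts n t2).zip (pvCuts n t2 ++ [(t2.length : Int)])).map
                  (Prod.map (· + k) (· + k))).filter (fun pr => pr.2 - pr.1 > 1)).map
                (fun pr => PySem.List.slice (t1 ++ x :: t2) (some (pr.1 + 1)) (some pr.2))
              = ((((-1) :: pvCuts n t2).zip (pvCuts n t2 ++ [(t2.length : Int)])).filter
                  (fun pr => pr.2 - pr.1 > 1)).map
                (fun pr => PySem.List.slice t2 (some (pr.1 + 1)) (some pr.2)) := by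
            rw [List.filter_map, List.map_map]
            have hfilt : (fun pr : Int × Int => decide (pr.2 - pr.1 > 1)) ∘
                (Prod.map (· + k) (· + k)) = (fun pr => decide (pr.2 - pr.1 > 1)) := by
              funext pr
              cases pr with
              | mk a b =>
                  simp only [Function.comp, Prod.map]
                  exact decide_eq_decide.mpr ⟨fun h => by omega, fun h => by omega⟩
            rw [hfilt]
            apply List.map_congr_left
            intro pr hpr
            have hprmem := List.mem_of_mem_filter hpr
            obtain ⟨hfst, hsnd⟩ := List.of_mem_zip hprmem
            have ha : -1 ≤ pr.1 := by
              rcases List.mem_cons.mp hfst with h | h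
              · omega
              · have := (cuts_mem_bounds n t2 _ h).1; omega
            have hb : 0 ≤ pr.2 := by
              rcases List.mem_append.mp hsnd with h | h
              · have := (cuts_mem_bounds n t2 _ h).1; omega
              · simp at h; omega
            simp only [Function.comp, Prod.map]
            have hsplit2 : t1 ++ x :: t2 = (t1 ++ [x]) ++ t2 := by simp
            have hklen : k = ((t1 ++ [x]).length : Int) := by simp [hk]
            have := slice_shift (t1 ++ [x]) t2 (pr.1 + 1) pr.2 (by omega) hb
            rw [← hklen, ← hsplit2] at this
            have harg : pr.1 + k + 1 = pr.1 + 1 + k := by ring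
            rw [harg]
            exact this
          by_cases ht1e : t1 = []
          · have h1 : (decide (((-1 : Int), (t1.length : Int)).2 - ((-1 : Int), (t1.length : Int)).1 > 1)) = false := by
              apply decide_eq_false
              intro h
              rw [ht1e] at h
              norm_num at h
            have hemp : t1.isEmpty = true := by rw [ht1e]; rfl
            simp only [h1, Bool.false_eq_true, if_false, hemp, if_pos]
            exact hmain
          · have hpos : 0 < t1.length := List.length_pos_iff.mpr ht1e
            have h1 : (decide (((-1 : Int), (t1.length : Int)).2 - ((-1 : Int), (t1.length : Int)).1 > 1)) = true := by
              apply decide_eq_true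
              show (t1.length : Int) - (-1) > 1
              omega
            have hemp : t1.isEmpty = false := by
              cases h : t1 with
              | nil => exact absurd h ht1e
              | cons a as => rfl
            have hslice : PySem.List.slice (t1 ++ x :: t2) (some (-1 + 1)) (some (t1.length : Int)) = t1 := by
              have h0 : (-1 : Int) + 1 = ((0 : ℕ) : Int) := by norm_num
              rw [h0, PySem.List.slice_natCast]
              simp
            simp only [h1, if_pos, List.map_cons, hslice, hemp, Bool.false_eq_true, if_false]
            rw [hmain]

-- ===== VERDICT (by name: the statement is the Claim_ definition above) =====
theorem split_tour_at_dummies_spec : Claim_equal_split_tour_at_dummies := by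
  intro tour n _
  unfold Spec_split_tour_at_dummies split_tour_at_dummies
  rw [splitA_go_eq, alt_eq_fSpec n tour.length tour le_rfl]
  simp
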